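-- pv_equiv track=rewrite | github.com/kbrandes45/advent_of_code2020 | adventofcode.py | is_ticket_valid
-- ===== SOURCE A (Python) =====
-- def is_ticket_valid(ticket, codes):
--     for t in ticket:
--         valid_count = 0
--         for k in codes:
--             if ((t >= codes[k][0][0] and t <= codes[k][0][1]) or
--                 (t >= codes[k][1][0] and t <= codes[k][1][1])):
--                 valid_count+=1
--         if valid_count == 0:
--             return False
--     return True
-- ===== SOURCE B (Python) =====
-- def is_ticket_valid(ticket, codes):
--     # Collect the two ranges of every code once, sort by lower bound, merge into
--     # disjoint intervals, then check each value against the merged list.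
--     ivs = sorted(((codes[k][i][0], codes[k][i][1]) for k in codes for i in (0, 1)),
--                  key=lambda iv: iv[0])
--     merged = []
--     for lo, hi in ivs:
--         if merged and lo <= merged[-1][1]:
--             if merged[-1][1] < hi:
--                 merged[-1] = (merged[-1][0], hi)
--         else:
--             merged.append((lo, hi))
--     return all(any(lo <= t <= hi for lo, hi in merged) for t in ticket)
-- ===== Notes on version B (the rewrite author's own statement) =====
-- stated objective: alternative
-- what changed: B collects all code ranges once, sorts them by lower bound and merges them into disjoint intervals, then checks each ticket value against the merged list, instead of re-scanning and counting over every code for every ticket value.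
-- outside the precondition, e.g. on is_ticket_valid([], {'a': []}): A returns True, B raises IndexError; on is_ticket_valid([5], {'a': [[1, 10]]}): A returns True, B raises IndexError
import Mathlib
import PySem

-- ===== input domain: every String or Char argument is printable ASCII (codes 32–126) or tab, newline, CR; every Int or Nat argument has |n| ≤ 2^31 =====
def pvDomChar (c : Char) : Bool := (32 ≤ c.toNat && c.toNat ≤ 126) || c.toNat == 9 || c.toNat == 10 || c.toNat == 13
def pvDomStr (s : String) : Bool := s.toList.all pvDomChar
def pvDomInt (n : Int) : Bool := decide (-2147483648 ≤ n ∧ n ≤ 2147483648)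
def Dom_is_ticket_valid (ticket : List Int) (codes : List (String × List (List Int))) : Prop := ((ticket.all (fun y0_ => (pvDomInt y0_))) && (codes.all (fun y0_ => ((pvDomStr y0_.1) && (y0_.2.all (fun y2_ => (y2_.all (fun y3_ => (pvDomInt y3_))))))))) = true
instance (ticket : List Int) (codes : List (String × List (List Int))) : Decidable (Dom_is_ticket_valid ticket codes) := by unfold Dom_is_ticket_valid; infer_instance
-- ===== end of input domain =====

-- A = per-value count over every code's two ranges; B = an alternative algorithm: sort all ranges
-- once, merge them into disjoint intervals, then check each value against the merged list.


-- ===== PORT A =====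
-- the two ranges of code k, read exactly as A indexes them (defaults only reachable outside Pre_)
def pvIv0 (r : List (List Int)) : Int × Int :=
  (PySem.List.pyGetD (PySem.List.pyGetD r 0 []) 0 0, PySem.List.pyGetD (PySem.List.pyGetD r 0 []) 1 0)
def pvIv1 (r : List (List Int)) : Int × Int :=
  (PySem.List.pyGetD (PySem.List.pyGetD r 1 []) 0 0, PySem.List.pyGetD (PySem.List.pyGetD r 1 []) 1 0)

-- inner loop of A: valid_count for one ticket value t
def pvA_count (d : PySem.Dict String (List (List Int))) (t : Int) : Int :=
  d.keys.foldl (fun cnt k =>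
    let r := d.getD k []
    if ((pvIv0 r).1 ≤ t ∧ t ≤ (pvIv0 r).2) ∨ ((pvIv1 r).1 ≤ t ∧ t ≤ (pvIv1 r).2)
    then cnt + 1 else cnt) 0

-- outer loop of A with its early return False
def pvA_loop (d : PySem.Dict String (List (List Int))) : List Int → Bool
  | [] => true
  | t :: rest => if pvA_count d t = 0 then false else pvA_loop d rest

def is_ticket_valid (ticket : List Int) (codes : List (String × List (List Int))) : Bool :=
  pvA_loop (PySem.Dict.ofList codes) ticket

-- ===== PORT B =====
-- all intervals, two per code, in dict-iteration order
def pvB_ivs (d : PySem.Dict String (List (List Int))) : List (Int × Int) :=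
  d.keys.flatMap (fun k => let r := d.getD k []; [pvIv0 r, pvIv1 r])

-- one step of B's merge loop over the sorted intervals
def pvB_mergeStep (merged : List (Int × Int)) (iv : Int × Int) : List (Int × Int) :=
  match merged.getLast? with
  | some last =>
      if iv.1 ≤ last.2 then
        (if last.2 < iv.2 then merged.dropLast ++ [(last.1, iv.2)] else merged)
      else merged ++ [iv]
  | none => merged ++ [iv]

def is_ticket_valid_alt (ticket : List Int) (codes : List (String × List (List Int))) : Bool :=
  let d := PySem.Dict.ofList codes
  let ivs := PySem.List.sorted (pvB_ivs d) (fun iv => iv.1) false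
  let merged := ivs.foldl pvB_mergeStep []
  ticket.all (fun t => merged.any (fun iv => decide (iv.1 ≤ t) && decide (t ≤ iv.2)))

-- ===== PRECONDITION & SPEC =====
-- Pre_ excludes inputs on which A's chained indexing codes[k][0][0..1] / codes[k][1][0..1] can raise
-- IndexError: every code must carry at least two ranges whose first two each have length ≥ 2. On a few
-- such malformed inputs A still returns (empty ticket, or a value accepted by an early range so the
-- later accesses are short-circuited away) while B's preprocessing reads all ranges and raises; those
-- defensibly-malformed inputs are excluded too (see cites).
def Pre_is_ticket_valid (ticket : List Int) (codes : List (String × List (List Int))) : Prop :=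
  ∀ p ∈ codes, 2 ≤ p.2.length ∧ 2 ≤ (p.2.getD 0 []).length ∧ 2 ≤ (p.2.getD 1 []).length
instance (ticket : List Int) (codes : List (String × List (List Int))) : Decidable (Pre_is_ticket_valid ticket codes) := by unfold Pre_is_ticket_valid; infer_instance
def pvWitness_is_ticket_valid : List Int × (List (String × List (List Int))) :=
  ([3, 7], [("row", [[1, 5], [6, 9]]), ("seat", [[0, 2], [11, 13]])])

def Spec_is_ticket_valid (ticket : List Int) (codes : List (String × List (List Int))) (out : Bool) : Prop := out = is_ticket_valid_alt ticket codes
instance (ticket : List Int) (codes : List (String × List (List Int))) (out : Bool) : Decidable (Spec_is_ticket_valid ticket codes out) := by unfold Spec_is_ticket_valid; infer_instance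

-- ===== CLAIM (what is proved, stated in full; the proofs are below) =====
def Claim_equal_is_ticket_valid : Prop := ∀ (ticket : List Int) (codes : List (String × List (List Int))), Dom_is_ticket_valid ticket codes → Pre_is_ticket_valid ticket codes → Spec_is_ticket_valid ticket codes (is_ticket_valid ticket codes)

-- ===== LEMMAS AND PROOFS =====

-- "t is covered by some interval of ivs"
def pvCov (t : Int) (ivs : List (Int × Int)) : Prop := ∃ iv ∈ ivs, iv.1 ≤ t ∧ t ≤ iv.2

theorem pvCov_append (t : Int) (xs ys : List (Int × Int)) :
    pvCov t (xs ++ ys) ↔ pvCov t xs ∨ pvCov t ys := by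
  simp [pvCov, or_and_right, exists_or]

-- A's valid_count is zero exactly when no interval of pvB_ivs covers t
theorem pvA_count_eq_zero (d : PySem.Dict String (List (List Int))) (t : Int) :
    pvA_count d t = 0 ↔ ¬ pvCov t (pvB_ivs d) := by
  have h : ∀ (ks : List String) (c : Int), 0 ≤ c →
      (ks.foldl (fun cnt k =>
        let r := d.getD k []
        if ((pvIv0 r).1 ≤ t ∧ t ≤ (pvIv0 r).2) ∨ ((pvIv1 r).1 ≤ t ∧ t ≤ (pvIv1 r).2)
        then cnt + 1 else cnt) c = 0 ↔
      c = 0 ∧ ¬ pvCov t (ks.flatMap (fun k => let r := d.getD k []; [pvIv0 r, pvIv1 r]))) := by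
    intro ks
    induction ks with
    | nil => intro c _; simp [pvCov]
    | cons k ks ih =>
      intro c hc
      simp only [List.foldl_cons, List.flatMap_cons, pvCov_append]
      by_cases hk : ((pvIv0 (d.getD k [])).1 ≤ t ∧ t ≤ (pvIv0 (d.getD k [])).2) ∨
          ((pvIv1 (d.getD k [])).1 ≤ t ∧ t ≤ (pvIv1 (d.getD k [])).2)
      · rw [if_pos hk, ih (c + 1) (by omega)]
        have hcov : pvCov t [pvIv0 (d.getD k []), pvIv1 (d.getD k [])] := by
          rcases hk with h0 | h1
          · exact ⟨pvIv0 (d.getD k []), by simp, h0⟩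
          · exact ⟨pvIv1 (d.getD k []), by simp, h1⟩
        constructor
        · intro ⟨h1, _⟩; omega
        · intro ⟨_, hn⟩; exact absurd (Or.inl hcov) hn
      · rw [if_neg hk, ih c hc]
        have hncov : ¬ pvCov t [pvIv0 (d.getD k []), pvIv1 (d.getD k [])] := by
          rintro ⟨iv, hiv, hle⟩
          simp only [List.mem_cons, List.not_mem_nil, or_false] at hiv
          rcases hiv with rfl | rfl
          · exact hk (Or.inl hle)
          · exact hk (Or.inr hle)
        tauto
  rw [pvA_count, h d.keys 0 le_rfl, pvB_ivs]
  tauto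

-- the merge loop preserves coverage, given the sortedness invariants
theorem pvMerge_cov (t : Int) :
    ∀ (l acc : List (Int × Int)),
      l.Pairwise (fun a b => a.1 ≤ b.1) →
      (∀ q, acc.getLast? = some q → ∀ p ∈ l, q.1 ≤ p.1) →
      (pvCov t (l.foldl pvB_mergeStep acc) ↔ pvCov t acc ∨ pvCov t l) := by
  intro l
  induction l with
  | nil => intro acc _ _; simp [pvCov]
  | cons p l ih =>
    intro acc hpw hinv
    have hpw' := (List.pairwise_cons.mp hpw).2
    have hp_le : ∀ q ∈ l, p.1 ≤ q.1 := (List.pairwise_cons.mp hpw).1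
    simp only [List.foldl_cons]
    have hstep : (pvCov t (pvB_mergeStep acc p) ↔ pvCov t acc ∨ pvCov t [p]) ∧
        (∀ q, (pvB_mergeStep acc p).getLast? = some q → ∀ r ∈ l, q.1 ≤ r.1) := by
      unfold pvB_mergeStep
      cases hlast : acc.getLast? with
      | none =>
        have hnil : acc = [] := List.getLast?_eq_none_iff.mp hlast
        subst hnil
        constructor
        · simp [pvCov]
        · intro q hq r hr
          simp at hq
          subst hq
          exact hp_le r hr
      | some last =>
        dsimp only
        have hql : last.1 ≤ p.1 := hinv last hlast p (by simp)
        have hacc : acc = acc.dropLast ++ [last] := (List.dropLast_append_getLast? last hlast).symm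
        by_cases h1 : p.1 ≤ last.2
        · rw [if_pos h1]
          by_cases h2 : last.2 < p.2
          · rw [if_pos h2]
            constructor
            · conv_rhs => rw [hacc]
              rw [pvCov_append, pvCov_append]
              simp only [pvCov, List.mem_singleton, exists_eq_left]
              constructor
              · rintro (h | h)
                · exact Or.inl (Or.inl h)
                · rcases h with ⟨hl, hr⟩
                  by_cases ht : t ≤ last.2
                  · exact Or.inl (Or.inr ⟨hl, ht⟩)
                  · exact Or.inr ⟨by omega, hr⟩
              · rintro ((h | h) | h)
                · exact Or.inl h
                · exact Or.inr ⟨h.1, by omega⟩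
                · exact Or.inr ⟨by omega, h.2⟩
            · intro q hq r hr
              simp only [List.getLast?_concat, Option.some.injEq] at hq
              subst hq
              exact le_trans hql (hp_le r hr)
          · rw [if_neg h2]
            constructor
            · simp only [pvCov, List.mem_singleton, exists_eq_left]
              constructor
              · exact fun h => Or.inl h
              · rintro (h | h)
                · exact h
                · exact ⟨last, by rw [hacc]; simp, by omega⟩
            · intro q hq r hr
              rw [hlast] at hq
              simp at hq
              subst hq
              exact le_trans hql (hp_le r hr)
        · rw [if_neg h1]
          constructor
          · rw [pvCov_append]
          · intro q hq r hr
            simp only [List.getLast?_concat, Option.some.injEq] at hq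
            subst hq
            exact hp_le r hr
    rw [ih (pvB_mergeStep acc p) hpw' hstep.2, hstep.1]
    have : pvCov t (p :: l) ↔ pvCov t [p] ∨ pvCov t l := by
      simp [pvCov, or_and_right, exists_or]
    rw [this]
    tauto

-- B's per-value test equals coverage by the raw interval list
theorem pvB_merged_cov (d : PySem.Dict String (List (List Int))) (t : Int) :
    pvCov t ((PySem.List.sorted (pvB_ivs d) (fun iv => iv.1) false).foldl pvB_mergeStep [])
      ↔ pvCov t (pvB_ivs d) := by
  have hperm := PySem.List.sorted_perm (pvB_ivs d) (fun iv => iv.1) false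
  have hpw := PySem.List.sorted_pairwise (pvB_ivs d) (fun iv => iv.1)
  rw [pvMerge_cov t _ [] hpw (by simp)]
  simp only [pvCov]
  constructor
  · rintro (h | ⟨iv, hiv, hle⟩)
    · exact absurd h (by simp [pvCov])
    · exact ⟨iv, hperm.mem_iff.mp hiv, hle⟩
  · rintro ⟨iv, hiv, hle⟩
    exact Or.inr ⟨iv, hperm.mem_iff.mpr hiv, hle⟩

-- ===== VERDICT (by name: the statement is the Claim_ definition above) =====
theorem is_ticket_valid_spec : Claim_equal_is_ticket_valid := by
  unfold Claim_equal_is_ticket_valid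
  intro ticket codes hD hP
  clear hD hP
  unfold Spec_is_ticket_valid is_ticket_valid is_ticket_valid_alt
  set d := PySem.Dict.ofList codes with hd
  induction ticket with
  | nil => simp [pvA_loop]
  | cons t rest ih =>
    simp only [pvA_loop, List.all_cons]
    by_cases h : pvA_count d t = 0
    · rw [if_pos h]
      have hnc := (pvA_count_eq_zero d t).mp h
      rw [← pvB_merged_cov d t] at hnc
      have : (((PySem.List.sorted (pvB_ivs d) (fun iv => iv.1) false).foldl pvB_mergeStep []).any
          (fun iv => decide (iv.1 ≤ t) && decide (t ≤ iv.2))) = false := by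
        simp only [List.any_eq_false, Bool.and_eq_true, decide_eq_true_eq, not_and]
        intro iv hiv h1 h2
        exact hnc ⟨iv, hiv, h1, h2⟩
      rw [this]
      simp
    · rw [if_neg h, ih]
      have hc := not_not.mp ((pvA_count_eq_zero d t).not.mp h)
      rw [← pvB_merged_cov d t] at hc
      rcases hc with ⟨iv, hiv, h1, h2⟩
      have : (((PySem.List.sorted (pvB_ivs d) (fun iv => iv.1) false).foldl pvB_mergeStep []).any
          (fun iv => decide (iv.1 ≤ t) && decide (t ≤ iv.2))) = true := by
        simp only [List.any_eq_true, Bool.and_eq_true, decide_eq_true_eq]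
        exact ⟨iv, hiv, h1, h2⟩
      rw [this]
      simp
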